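-- pv_equiv track=rewrite | github.com/tomdom35/HackerRank | Two Characters/Two Characters.py | isAlternating
-- ===== SOURCE A (Python) =====
-- def isAlternating(s):
--     if len(s) < 2:
--         return False
--     for index, i in enumerate(s):
--         if(index < len(s)-1):
--             if s[index] == s[index+1]:
--                 return False
--     return True
-- ===== SOURCE B (Python) =====
-- def isAlternating(s):
--     if len(s) < 2:
--         return False
--     return all(c + c not in s for c in set(s))
-- ===== Notes on version B (the rewrite author's own statement) =====
-- stated objective: alternative
-- what changed: Instead of scanning adjacent index pairs, B builds the set of distinct characters and checks via substring search that no character doubled (c+c) occurs in s.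
import Mathlib
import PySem

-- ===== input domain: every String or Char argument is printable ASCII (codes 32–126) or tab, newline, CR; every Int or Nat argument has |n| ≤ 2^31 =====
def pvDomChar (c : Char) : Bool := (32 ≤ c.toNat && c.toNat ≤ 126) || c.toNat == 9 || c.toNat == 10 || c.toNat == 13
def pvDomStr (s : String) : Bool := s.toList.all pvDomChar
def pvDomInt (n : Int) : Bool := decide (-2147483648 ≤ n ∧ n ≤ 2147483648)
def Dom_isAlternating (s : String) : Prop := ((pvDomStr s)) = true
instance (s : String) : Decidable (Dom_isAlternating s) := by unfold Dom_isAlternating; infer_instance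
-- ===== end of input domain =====

-- B replaces A's adjacent-index scan by a substring search: over the set of distinct
-- characters of s it checks that no doubled character c+c occurs in s (alternative).

-- ===== PORT A =====
-- the 'for index, i in enumerate(s)' loop with its early 'return False'
def isAlternatingGo (l : List Char) (n : Int) : List (Int × Char) → Bool
  | [] => true
  | (idx, _) :: rest =>
    if idx < n - 1 then
      if PySem.List.pyGet? l idx == PySem.List.pyGet? l (idx + 1) then false
      else isAlternatingGo l n rest
    else isAlternatingGo l n rest

def isAlternating (s : String) : Bool :=
  let l := s.toList
  let n : Int := l.length
  if n < 2 then false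
  else isAlternatingGo l n (PySem.List.enumerate l)

-- ===== PORT B =====
-- 'all(c + c not in s for c in set(s))': set(s) = PySem.Set.ofList, 'c+c in s' = PySem.Str.isIn
def isAlternating_alt (s : String) : Bool :=
  if s.toList.length < 2 then false
  else (PySem.Set.ofList s.toList).all (fun c => !(PySem.Str.isIn (String.ofList [c, c]) s))

-- ===== PRECONDITION & SPEC =====
def Spec_isAlternating (s : String) (out : Bool) : Prop := out = isAlternating_alt s
instance (s : String) (out : Bool) : Decidable (Spec_isAlternating s out) := by unfold Spec_isAlternating; infer_instance

-- ===== CLAIM (what is proved, stated in full; the proofs are below) =====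
def Claim_equal_isAlternating : Prop := ∀ (s : String), Dom_isAlternating s → Spec_isAlternating s (isAlternating s)

-- ===== LEMMAS AND PROOFS =====

-- A's loop is the adjacent-pair check
theorem isAlternatingGo_key (suf : List Char) : ∀ (pre : List Char),
    isAlternatingGo (pre ++ suf) ((pre ++ suf).length : Int)
        (PySem.List.enumerate suf (pre.length : Int))
      = (suf.zip suf.tail).all (fun p => p.1 != p.2) := by
  induction suf with
  | nil => intro pre; simp [isAlternatingGo, PySem.List.enumerate_nil]
  | cons a t ih =>
    intro pre
    cases t with
    | nil =>
      simp [PySem.List.enumerate_cons, PySem.List.enumerate_nil, isAlternatingGo]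
    | cons b t2 =>
      have hidx : (pre.length : Int) < ((pre ++ a :: b :: t2).length : Int) - 1 := by
        simp; omega
      have hga : PySem.List.pyGet? (pre ++ a :: b :: t2) (pre.length : Int) = some a := by
        exact PySem.List.pyGet?_append_length (pre := pre) (y := a) (ys := b :: t2)
      have hgb : PySem.List.pyGet? (pre ++ a :: b :: t2) ((pre.length : Int) + 1) = some b := by
        have : pre ++ a :: b :: t2 = (pre ++ [a]) ++ b :: t2 := by simp
        rw [this]
        have h2 : (((pre ++ [a]).length : Int)) = (pre.length : Int) + 1 := by simp
        rw [← h2]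
        simpa using PySem.List.pyGet?_append_length (pre := pre ++ [a]) (y := b) (ys := t2)
      rw [PySem.List.enumerate_cons]
      simp only [isAlternatingGo, if_pos hidx, hga, hgb]
      by_cases hab : a = b
      · subst hab; simp
      · have hne : (some a == some b) = false := by simp [hab]
        rw [hne]
        simp only [Bool.false_eq_true, if_false]
        have hpre : pre ++ a :: b :: t2 = (pre ++ [a]) ++ b :: t2 := by simp
        have hstart : (pre.length : Int) + 1 = ((pre ++ [a]).length : Int) := by simp
        rw [hpre, hstart, ih (pre ++ [a])]
        simp [List.zip, hab]

-- the adjacent-pair check holds iff no doubled character occurs as an infix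
theorem noAdj_iff_noDouble (l : List Char) :
    ((l.zip l.tail).all (fun p => p.1 != p.2) = true) ↔ ∀ c : Char, ¬ [c, c] <:+: l := by
  induction l with
  | nil =>
    simp only [List.zip_nil_left, List.all_nil, true_iff]
    intro c h
    have := h.length_le; simp at this
  | cons a t ih =>
    cases t with
    | nil =>
      simp only [List.tail_cons, List.zip_nil_right, List.all_nil, true_iff]
      intro c h
      have := h.length_le; simp at this
    | cons b t2 =>
      constructor
      · intro h c hinf
        simp only [List.tail_cons, List.zip_cons_cons, List.all_cons, Bool.and_eq_true,
          bne_iff_ne, ne_eq] at h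
        rcases (List.infix_cons_iff.mp hinf) with hpre | htail
        · rcases hpre with ⟨u, hu⟩
          have h1 : c = a := by
            have := congrArg (fun x => x[0]?) hu; simpa using this
          have h2 : c = b := by
            have := congrArg (fun x => x[1]?) hu; simpa using this
          exact h.1 (h1.symm.trans h2)
        · have hall : ((b :: t2).zip (b :: t2).tail).all (fun p => p.1 != p.2) = true := by
            cases t2 with
            | nil => simp
            | cons x xs =>
              simp only [List.tail_cons, List.zip_cons_cons, List.all_cons,
                Bool.and_eq_true] at h ⊢
              exact h.2
          exact (ih.mp hall) c htail
      · intro h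
        simp only [List.tail_cons, List.zip_cons_cons, List.all_cons, Bool.and_eq_true,
          bne_iff_ne, ne_eq]
        refine ⟨?_, ?_⟩
        · intro hab
          exact h a (by subst hab; exact ⟨[], t2, by simp⟩)
        · have hall : ∀ c : Char, ¬ [c, c] <:+: (b :: t2) := by
            intro c hc
            exact h c (hc.trans (List.suffix_cons a (b :: t2)).isInfix)
          have := ih.mpr hall
          cases t2 with
          | nil => simp
          | cons x xs =>
            simpa only [List.tail_cons, List.zip_cons_cons, List.all_cons,
              Bool.and_eq_true] using this

-- B's set-scan holds iff no doubled character occurs as an infix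
theorem alt_all_iff (l : List Char) (s : String) (hs : s.toList = l) :
    ((PySem.Set.ofList l).all (fun c => !(PySem.Str.isIn (String.ofList [c, c]) s)) = true)
      ↔ ∀ c : Char, ¬ [c, c] <:+: l := by
  rw [List.all_eq_true]
  constructor
  · intro h c hinf
    have hmem : c ∈ l := by
      rcases hinf with ⟨u, v, huv⟩
      exact huv ▸ (by simp)
    have := h c ((PySem.Set.mem_ofList _ _).mpr hmem)
    rw [Bool.not_eq_eq_eq_not, Bool.not_true, ← Bool.not_eq_true,
      PySem.Str.isIn_iff_infix] at this
    exact this (by simpa [hs] using hinf)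
  · intro h c _
    rw [Bool.not_eq_eq_eq_not, Bool.not_true, ← Bool.not_eq_true, PySem.Str.isIn_iff_infix]
    intro hinf
    exact h c (by simpa [hs] using hinf)

theorem isAlternating_eq (s : String) : isAlternating s = isAlternating_alt s := by
  unfold isAlternating isAlternating_alt
  set l := s.toList with hl
  by_cases h2 : (l.length : Int) < 2
  · have : l.length < 2 := by exact_mod_cast h2
    simp [h2, this]
  · have hn : ¬ l.length < 2 := by omega
    simp only [h2, hn, if_false]
    have hA : isAlternatingGo l (l.length : Int) (PySem.List.enumerate l)
        = (l.zip l.tail).all (fun p => p.1 != p.2) := by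
      have := isAlternatingGo_key l []
      simpa using this
    rw [hA]
    have h1 := noAdj_iff_noDouble l
    have h2' := alt_all_iff l s hl.symm
    by_cases hx : (l.zip l.tail).all (fun p => p.1 != p.2) = true
    · rw [hx, Eq.comm, h2']
      exact h1.mp hx
    · rw [Bool.not_eq_true] at hx
      rw [hx, Eq.comm, Bool.eq_false_iff, Ne, h2']
      intro hc
      rw [← h1] at hc
      simp [hx] at hc

-- ===== VERDICT (by name: the statement is the Claim_ definition above) =====
theorem isAlternating_spec : Claim_equal_isAlternating := by
  intro s _
  exact isAlternating_eq s
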